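-- pv_equiv track=rewrite | github.com/TrendsetAM/BOQ-TOOLS | core/column_mapper.py | _identify_parent_spans
-- ===== SOURCE A (Python) =====
-- from typing import Dict, List, Tuple, Optional, Any, Set
--
-- def _identify_parent_spans(parent_row: List[str], subheader_row: List[str]) -> List[Tuple[int, int, str]]:
--     """
--     Identify the spans of parent headers, simulating merged cell behavior
--
--     Args:
--         parent_row: Parent header row
--         subheader_row: Subheader row
--
--     Returns:
--         List of tuples (start_col, end_col, header_text) for each parent header span
--     """
--     spans = []
--     i = 0
--
--     while i < len(parent_row):
--         parent_cell = parent_row[i]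
--
--         if parent_cell and str(parent_cell).strip():
--             parent_header = str(parent_cell).strip()
--             span_start = i
--
--             # Find the end of this parent header's span
--             # A parent header spans until:
--             # 1. We find another non-empty parent header, OR
--             # 2. We find empty subheaders (indicating end of logical group), OR
--             # 3. We reach the end of the row
--
--             span_end = i
--             j = i + 1
--             consecutive_empty_subheaders = 0
--
--             while j < len(parent_row):
--                 # If we find another parent header, the current span ends
--                 if parent_row[j] and str(parent_row[j]).strip():
--                     break
--
--                 # If we find a subheader, extend the span
--                 if j < len(subheader_row) and subheader_row[j] and str(subheader_row[j]).strip():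
--                     span_end = j
--                     consecutive_empty_subheaders = 0
--                 else:
--                     consecutive_empty_subheaders += 1
--                     # If we have too many consecutive empty subheaders, stop the span
--                     if consecutive_empty_subheaders >= 2:
--                         break
--
--                 j += 1
--
--             spans.append((span_start, span_end, parent_header))
--             i = span_end + 1
--         else:
--             i += 1
--
--     return spans
-- ===== SOURCE B (Python) =====
-- def _identify_parent_spans(parent_row, subheader_row):
--     spans = []
--     active = None          # (start_col, end_col, header_text) of the open span
--     empty_count = 0        # consecutive empty subheaders while a span is open
--     for i, cell in enumerate(parent_row):
--         text = str(cell).strip()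
--         if cell and text:
--             if active is not None:
--                 spans.append(active)
--             active = (i, i, text)
--             empty_count = 0
--         elif active is not None:
--             if i < len(subheader_row) and subheader_row[i] and str(subheader_row[i]).strip():
--                 active = (active[0], i, active[2])
--                 empty_count = 0
--             else:
--                 empty_count += 1
--                 if empty_count >= 2:
--                     spans.append(active)
--                     active = None
--     if active is not None:
--         spans.append(active)
--     return spans
-- ===== Notes on version B (the rewrite author's own statement) =====
-- stated objective: simpler
-- what changed: Replaced the nested while loops (a forward inner scan per parent header, with the outer index reset to span_end+1 and re-scanning of already-visited cells) by a single linear pass with an explicit state machine carrying the open span and a consecutive-empty-subheader counter.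
import Mathlib
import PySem

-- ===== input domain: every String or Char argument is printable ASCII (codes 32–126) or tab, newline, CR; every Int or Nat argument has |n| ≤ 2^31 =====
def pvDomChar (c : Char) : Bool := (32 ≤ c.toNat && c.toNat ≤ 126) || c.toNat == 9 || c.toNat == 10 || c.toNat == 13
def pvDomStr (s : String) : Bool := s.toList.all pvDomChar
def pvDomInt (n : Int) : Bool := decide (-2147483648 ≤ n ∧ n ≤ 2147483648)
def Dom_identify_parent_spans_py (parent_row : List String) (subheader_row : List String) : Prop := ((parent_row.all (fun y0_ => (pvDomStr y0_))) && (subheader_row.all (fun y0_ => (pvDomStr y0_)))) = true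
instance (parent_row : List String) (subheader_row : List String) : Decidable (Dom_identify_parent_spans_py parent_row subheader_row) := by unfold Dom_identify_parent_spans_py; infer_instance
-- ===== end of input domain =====

-- B replaces A's nested while loops by a single linear pass with an explicit state machine (objective: simpler).
-- Loops are ported as structural recursion on a fuel argument that counts the remaining iterations
-- (fuel ≥ n - index always holds from the stated entry points, so the fuel-0 base case is never reached).

-- ===== PORT A =====
-- Python truthiness of `cell and str(cell).strip()` for a str cell
def pvCellNE (cell : String) : Bool := !(cell == "") && !(PySem.Str.strip cell == "")

-- subheader test `j < len(subheader_row) and subheader_row[j] and str(subheader_row[j]).strip()`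
def pvSubNE (subheader_row : List String) (j : Nat) : Bool :=
  decide (j < subheader_row.length) && pvCellNE (subheader_row.getD j "")

-- A's inner while loop: returns span_end
def pvAInner (parent_row subheader_row : List String) (n : Nat) : Nat → Nat → Nat → Nat → Nat
  | 0, _, e, _ => e
  | fuel+1, j, e, c =>
    if j < n then
      if pvCellNE (parent_row.getD j "") then e
      else if pvSubNE subheader_row j then pvAInner parent_row subheader_row n fuel (j+1) j 0
      else if c + 1 ≥ 2 then e
      else pvAInner parent_row subheader_row n fuel (j+1) e (c+1)
    else e

-- A's outer while loop (the inner loop starts at j = i+1, so fuel n is always sufficient for it)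
def pvAOuter (parent_row subheader_row : List String) (n : Nat) : Nat → Nat → List (Int × Int × String)
  | 0, _ => []
  | fuel+1, i =>
    if i < n then
      if pvCellNE (parent_row.getD i "") then
        ((i : Int), (pvAInner parent_row subheader_row n n (i+1) i 0 : Int),
          PySem.Str.strip (parent_row.getD i "")) ::
          pvAOuter parent_row subheader_row n fuel (pvAInner parent_row subheader_row n n (i+1) i 0 + 1)
      else pvAOuter parent_row subheader_row n fuel (i+1)
    else []

def identify_parent_spans_py (parent_row : List String) (subheader_row : List String) : List (Int × Int × String) :=
  pvAOuter parent_row subheader_row parent_row.length parent_row.length 0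

-- ===== PORT B =====
-- B's single for-loop: state = (spans so far, currently open span, consecutive-empty-subheader counter)
def pvBLoop (parent_row subheader_row : List String) (n : Nat) :
    Nat → Nat → List (Int × Int × String) → Option (Nat × Nat × String) → Nat →
    List (Int × Int × String) × Option (Nat × Nat × String)
  | 0, _, spans, active, _ => (spans, active)
  | fuel+1, i, spans, active, c =>
    if i < n then
      if pvCellNE (parent_row.getD i "") then
        pvBLoop parent_row subheader_row n fuel (i+1)
          (match active with
           | some a => spans ++ [((a.1 : Int), (a.2.1 : Int), a.2.2)]
           | none => spans)
          (some (i, i, PySem.Str.strip (parent_row.getD i ""))) 0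
      else
        match active with
        | some a =>
          if pvSubNE subheader_row i then
            pvBLoop parent_row subheader_row n fuel (i+1) spans (some (a.1, i, a.2.2)) 0
          else if c + 1 ≥ 2 then
            pvBLoop parent_row subheader_row n fuel (i+1)
              (spans ++ [((a.1 : Int), (a.2.1 : Int), a.2.2)]) none (c+1)
          else
            pvBLoop parent_row subheader_row n fuel (i+1) spans (some a) (c+1)
        | none => pvBLoop parent_row subheader_row n fuel (i+1) spans none c
    else (spans, active)

def identify_parent_spans_py_alt (parent_row : List String) (subheader_row : List String) : List (Int × Int × String) :=
  match pvBLoop parent_row subheader_row parent_row.length parent_row.length 0 [] none 0 with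
  | (spans, some a) => spans ++ [((a.1 : Int), (a.2.1 : Int), a.2.2)]
  | (spans, none) => spans

-- ===== PRECONDITION & SPEC =====
def Spec_identify_parent_spans_py (parent_row : List String) (subheader_row : List String) (out : List (Int × Int × String)) : Prop := out = identify_parent_spans_py_alt parent_row subheader_row
instance (parent_row : List String) (subheader_row : List String) (out : List (Int × Int × String)) : Decidable (Spec_identify_parent_spans_py parent_row subheader_row out) := by unfold Spec_identify_parent_spans_py; infer_instance

-- ===== CLAIM (what is proved, stated in full; the proofs are below) =====
def Claim_equal_identify_parent_spans_py : Prop := ∀ (parent_row : List String) (subheader_row : List String), Dom_identify_parent_spans_py parent_row subheader_row → Spec_identify_parent_spans_py parent_row subheader_row (identify_parent_spans_py parent_row subheader_row)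

-- ===== LEMMAS AND PROOFS =====

-- fuel-free reference form of A's inner loop (proof-side only)
def pvAInnerW (parent_row subheader_row : List String) (n j e c : Nat) : Nat :=
  if _h : j < n then
    if pvCellNE (parent_row.getD j "") then e
    else if pvSubNE subheader_row j then pvAInnerW parent_row subheader_row n (j+1) j 0
    else if c + 1 ≥ 2 then e
    else pvAInnerW parent_row subheader_row n (j+1) e (c+1)
  else e
termination_by n - j

theorem pvAInnerW_ge (parent_row subheader_row : List String) (n : Nat) :
    ∀ k j e c, n - j ≤ k → e ≤ j → e ≤ pvAInnerW parent_row subheader_row n j e c := by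
  intro k
  induction k with
  | zero =>
    intro j e c hk he
    rw [pvAInnerW]
    split
    · omega
    · exact Nat.le_refl e
  | succ k ih =>
    intro j e c hk he
    rw [pvAInnerW]
    split
    · split
      · exact Nat.le_refl e
      · split
        · exact Nat.le_trans he (ih (j+1) j 0 (by omega) (Nat.le_succ j))
        · split
          · exact Nat.le_refl e
          · exact ih (j+1) e (c+1) (by omega) (by omega)
    · exact Nat.le_refl e

-- fuel-free reference form of A's outer loop (proof-side only)
def pvAOuterW (parent_row subheader_row : List String) (n i : Nat) : List (Int × Int × String) :=
  if h : i < n then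
    if pvCellNE (parent_row.getD i "") then
      ((i : Int), (pvAInnerW parent_row subheader_row n (i+1) i 0 : Int),
        PySem.Str.strip (parent_row.getD i "")) ::
        pvAOuterW parent_row subheader_row n (pvAInnerW parent_row subheader_row n (i+1) i 0 + 1)
    else pvAOuterW parent_row subheader_row n (i+1)
  else []
termination_by n - i
decreasing_by
  · have := pvAInnerW_ge parent_row subheader_row n (n - (i+1)) (i+1) i 0 (Nat.le_refl _) (Nat.le_succ i)
    omega
  · omega

-- sufficient fuel: the fueled ports compute the reference loops
theorem pvAInner_fuel (p s : List String) (n : Nat) :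
    ∀ fuel j e c, n - j ≤ fuel →
      pvAInner p s n fuel j e c = pvAInnerW p s n j e c := by
  intro fuel
  induction fuel with
  | zero =>
    intro j e c hk
    rw [pvAInnerW]
    rw [dif_neg (by omega)]
    rfl
  | succ fuel ih =>
    intro j e c hk
    rw [pvAInnerW]
    by_cases h : j < n
    · rw [dif_pos h]
      show (if j < n then _ else _) = _
      rw [if_pos h]
      split
      · rfl
      · split
        · exact ih (j+1) j 0 (by omega)
        · split
          · rfl
          · exact ih (j+1) e (c+1) (by omega)
    · rw [dif_neg h]
      show (if j < n then _ else _) = _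
      rw [if_neg h]

theorem pvAOuter_fuel (p s : List String) (n : Nat) :
    ∀ fuel i, n - i ≤ fuel →
      pvAOuter p s n fuel i = pvAOuterW p s n i := by
  intro fuel
  induction fuel with
  | zero =>
    intro i hk
    rw [pvAOuterW, dif_neg (by omega)]
    rfl
  | succ fuel ih =>
    intro i hk
    rw [pvAOuterW]
    by_cases h : i < n
    · rw [dif_pos h]
      show (if i < n then _ else _) = _
      rw [if_pos h]
      split
      · have hge := pvAInnerW_ge p s n (n - (i+1)) (i+1) i 0 (Nat.le_refl _) (Nat.le_succ i)
        rw [pvAInner_fuel p s n n (i+1) i 0 (by omega)]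
        rw [ih (pvAInnerW p s n (i+1) i 0 + 1) (by omega)]
      · exact ih (i+1) (by omega)
    · rw [dif_neg h]
      show (if i < n then _ else _) = _
      rw [if_neg h]

-- after-the-loop flush of B's state
def pvFlush (x : List (Int × Int × String) × Option (Nat × Nat × String)) : List (Int × Int × String) :=
  match x.2 with
  | some a => x.1 ++ [((a.1 : Int), (a.2.1 : Int), a.2.2)]
  | none => x.1

-- A's outer loop skips over empty parent cells
theorem pvAOuterW_skip (p s : List String) (n : Nat) :
    ∀ k a b, b - a ≤ k → a ≤ b → (∀ m, a ≤ m → m < b → pvCellNE (p.getD m "") = false) →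
    pvAOuterW p s n a = pvAOuterW p s n b := by
  intro k
  induction k with
  | zero =>
    intro a b hk hab _
    have : a = b := by omega
    rw [this]
  | succ k ih =>
    intro a b hk hab hemp
    by_cases hab' : a = b
    · rw [hab']
    · have hlt : a < b := by omega
      have step : pvAOuterW p s n a = pvAOuterW p s n (a+1) := by
        rw [pvAOuterW]
        split
        · rw [hemp a (Nat.le_refl a) hlt]
          simp
        · rename_i h
          rw [pvAOuterW]
          rw [dif_neg (by omega)]
      rw [step]
      exact ih (a+1) b (by omega) hlt (fun m h1 h2 => hemp m (by omega) h2)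

-- main invariant: B's state machine from any state equals A's resumption
theorem pvMain (p s : List String) (n : Nat) :
    ∀ fuel i, n - i ≤ fuel →
      ((∀ spans c, pvFlush (pvBLoop p s n fuel i spans none c) = spans ++ pvAOuterW p s n i)
      ∧ (∀ spans st e tx c, e < i → (∀ m, e < m → m < i → pvCellNE (p.getD m "") = false) →
          pvFlush (pvBLoop p s n fuel i spans (some (st, e, tx)) c)
            = spans ++ ((st : Int), (pvAInnerW p s n i e c : Int), tx)
                :: pvAOuterW p s n (pvAInnerW p s n i e c + 1))) := by
  intro fuel
  induction fuel with
  | zero =>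
    intro i hk
    constructor
    · intro spans c
      rw [pvAOuterW, dif_neg (by omega)]
      simp [pvBLoop, pvFlush]
    · intro spans st e tx c he hemp
      rw [pvAInnerW, dif_neg (by omega)]
      have hsk : pvAOuterW p s n (e+1) = pvAOuterW p s n i :=
        pvAOuterW_skip p s n (i - (e+1)) (e+1) i (Nat.le_refl _) (by omega)
          (fun m h1 h2 => hemp m (by omega) h2)
      rw [hsk, pvAOuterW, dif_neg (by omega)]
      simp [pvBLoop, pvFlush]
  | succ fuel ih =>
    intro i hk
    by_cases h : i < n
    · constructor
      · intro spans c
        rw [pvAOuterW, dif_pos h]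
        show pvFlush (if i < n then _ else _) = _
        rw [if_pos h]
        by_cases hp : pvCellNE (p.getD i "") = true
        · rw [if_pos hp, if_pos hp]
          have h2 := (ih (i+1) (by omega)).2 spans i i
            (PySem.Str.strip (p.getD i "")) 0 (Nat.lt_succ_self i) (by omega)
          simpa using h2
        · rw [if_neg hp, if_neg hp]
          exact (ih (i+1) (by omega)).1 spans c
      · intro spans st e tx c he hemp
        rw [pvAInnerW, dif_pos h]
        show pvFlush (if i < n then _ else _) = _
        rw [if_pos h]
        by_cases hp : pvCellNE (p.getD i "") = true
        · -- a new parent header closes the current span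
          rw [if_pos hp, if_pos hp]
          have h2 := (ih (i+1) (by omega)).2 (spans ++ [((st : Int), (e : Int), tx)]) i i
            (PySem.Str.strip (p.getD i "")) 0 (Nat.lt_succ_self i) (by omega)
          have hsk : pvAOuterW p s n (e+1) = pvAOuterW p s n i :=
            pvAOuterW_skip p s n (i - (e+1)) (e+1) i (Nat.le_refl _) (by omega)
              (fun m h1 h2 => hemp m (by omega) h2)
          rw [hsk, pvAOuterW, dif_pos h, if_pos hp]
          simpa using h2
        · rw [if_neg hp, if_neg hp]
          by_cases hs : pvSubNE s i = true
          · rw [if_pos hs]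
            have h2 := (ih (i+1) (by omega)).2 spans st i tx 0 (Nat.lt_succ_self i) (by omega)
            simpa [hs] using h2
          · rw [if_neg hs]
            by_cases hc : c + 1 ≥ 2
            · rw [if_pos hc]
              have h1 := (ih (i+1) (by omega)).1 (spans ++ [((st : Int), (e : Int), tx)]) (c+1)
              have hsk : pvAOuterW p s n (e+1) = pvAOuterW p s n (i+1) :=
                pvAOuterW_skip p s n ((i+1) - (e+1)) (e+1) (i+1) (Nat.le_refl _) (by omega)
                  (fun m h1 h2 => by
                    by_cases hm : m = i
                    · rw [hm]; exact eq_false_of_ne_true hp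
                    · exact hemp m (by omega) (by omega))
              rw [hsk]
              simpa [hs, hc] using h1
            · rw [if_neg hc]
              have h2 := (ih (i+1) (by omega)).2 spans st e tx (c+1) (by omega)
                (fun m h1 h2 => by
                  by_cases hm : m = i
                  · rw [hm]; exact eq_false_of_ne_true hp
                  · exact hemp m h1 (by omega))
              simpa [hs, hc] using h2
    · -- i ≥ n: the loop body is not entered
      constructor
      · intro spans c
        rw [pvAOuterW, dif_neg h]
        show pvFlush (if i < n then _ else _) = _
        rw [if_neg h]
        simp [pvFlush]
      · intro spans st e tx c he hemp
        rw [pvAInnerW, dif_neg h]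
        have hsk : pvAOuterW p s n (e+1) = pvAOuterW p s n i :=
          pvAOuterW_skip p s n (i - (e+1)) (e+1) i (Nat.le_refl _) (by omega)
            (fun m h1 h2 => hemp m (by omega) h2)
        rw [hsk, pvAOuterW, dif_neg h]
        show pvFlush (if i < n then _ else _) = _
        rw [if_neg h]
        simp [pvFlush]

-- ===== VERDICT (by name: the statement is the Claim_ definition above) =====
theorem identify_parent_spans_py_spec : Claim_equal_identify_parent_spans_py := by
  intro p s _dom
  unfold Spec_identify_parent_spans_py identify_parent_spans_py identify_parent_spans_py_alt
  have h := (pvMain p s p.length p.length 0 (by omega)).1 [] 0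
  rw [pvAOuter_fuel p s p.length p.length 0 (by omega)]
  rcases hb : pvBLoop p s p.length p.length 0 [] none 0 with ⟨sp, a⟩
  rw [hb] at h
  cases a <;> simpa [pvFlush] using h.symm
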